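-- pv_equiv track=rewrite | github.com/Fioy-01/Dissertation | mis_fever/code/bert_real_runner_fast.py | majority_minority_classes
-- ===== SOURCE A (Python) =====
-- from typing import List, Dict, Tuple
--
-- def majority_minority_classes(counts: Dict[str, int]):
--     if not counts:
--         return [], []
--     min_cnt = min(counts.values())
--     max_cnt = max(counts.values())
--     mins = [k for k, v in counts.items() if v == min_cnt]
--     maxs = [k for k, v in counts.items() if v == max_cnt]
--     return mins, maxs
-- ===== SOURCE B (Python) =====
-- def majority_minority_classes(counts):
--     if not counts:
--         return [], []
--     groups = {}
--     for k, v in counts.items():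
--         groups.setdefault(v, []).append(k)
--     return groups[min(groups)], groups[max(groups)]
-- ===== Notes on version B (the rewrite author's own statement) =====
-- stated objective: alternative
-- what changed: Replaces A's four scans (min, max, two filter comprehensions) with one grouping pass building an inverted index from count value to keys, then two lookups at the min/max group keys.
import Mathlib
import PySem

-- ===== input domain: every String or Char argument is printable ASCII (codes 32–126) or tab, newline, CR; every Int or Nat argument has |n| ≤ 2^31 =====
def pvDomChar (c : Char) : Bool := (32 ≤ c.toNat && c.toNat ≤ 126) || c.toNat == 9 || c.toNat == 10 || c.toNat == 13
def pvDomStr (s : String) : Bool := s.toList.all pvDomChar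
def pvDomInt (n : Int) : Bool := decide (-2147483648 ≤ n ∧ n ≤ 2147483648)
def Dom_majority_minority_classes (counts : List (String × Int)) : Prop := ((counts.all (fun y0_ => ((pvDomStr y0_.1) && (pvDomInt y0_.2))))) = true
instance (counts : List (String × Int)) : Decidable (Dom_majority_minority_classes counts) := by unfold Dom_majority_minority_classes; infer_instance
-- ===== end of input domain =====

-- B replaces A's four scans (min, max, two filters) with a single grouping pass into a
-- value→keys dict followed by two lookups; an alternative decomposition, not faster.

-- ===== PORT A =====
def majority_minority_classes (counts : List (String × Int)) : List String × List String :=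
  if counts = [] then ([], [])
  else
    match PySem.List.min? (counts.map Prod.snd) (fun x => x),
          PySem.List.max? (counts.map Prod.snd) (fun x => x) with
    | some min_cnt, some max_cnt =>
        ((counts.filter (fun kv => kv.2 == min_cnt)).map Prod.fst,
         (counts.filter (fun kv => kv.2 == max_cnt)).map Prod.fst)
    | _, _ => ([], [])  -- unreachable: counts ≠ []

-- ===== PORT B =====
def majority_minority_classes_alt (counts : List (String × Int)) : List String × List String :=
  if counts = [] then ([], [])
  else
    let groups := counts.foldl (fun d kv => d.modify kv.2 [] (fun g => g ++ [kv.1])) PySem.Dict.empty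
    match PySem.List.min? groups.keys (fun x => x) with
    | none => ([], [])  -- unreachable: groups nonempty
    | some mn =>
      match PySem.List.max? groups.keys (fun x => x) with
      | none => ([], [])  -- unreachable
      | some mx => (groups.getD mn [], groups.getD mx [])

-- ===== PRECONDITION & SPEC =====
def Spec_majority_minority_classes (counts : List (String × Int)) (out : List String × List String) : Prop := out = majority_minority_classes_alt counts
instance (counts : List (String × Int)) (out : List String × List String) : Decidable (Spec_majority_minority_classes counts out) := by unfold Spec_majority_minority_classes; infer_instance

-- ===== CLAIM (what is proved, stated in full; the proofs are below) =====
def Claim_equal_majority_minority_classes : Prop := ∀ (counts : List (String × Int)), Dom_majority_minority_classes counts → Spec_majority_minority_classes counts (majority_minority_classes counts)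

-- ===== LEMMAS AND PROOFS =====

-- keys of the grouping dict have the same members as the value list
lemma mem_groups_keys (counts : List (String × Int)) (c : Int) :
    c ∈ (counts.foldl (fun d kv => d.modify kv.2 [] (fun g => g ++ [kv.1])) PySem.Dict.empty).keys
      ↔ c ∈ counts.map Prod.snd := by
  rw [PySem.Dict.keys_foldl_modify_key (key := Prod.snd)]
  simp [PySem.Dict.keys_empty, PySem.Set.mem_update]

-- lookup in the grouping dict is A's filter
lemma getD_groups (counts : List (String × Int)) (c : Int) :
    (counts.foldl (fun d kv => d.modify kv.2 [] (fun g => g ++ [kv.1])) PySem.Dict.empty).getD c []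
      = (counts.filter (fun kv => kv.2 == c)).map Prod.fst := by
  have h := PySem.Dict.getD_foldl_modify_append
      (l := counts.map (fun kv => (kv.2, kv.1))) (d := PySem.Dict.empty) (c := c)
  rw [List.foldl_map] at h
  simp only [h, PySem.Dict.getD_empty, List.nil_append, List.filter_map, List.map_map]
  rfl

-- min?/max? with identity key over two member-equal nonempty lists agree
lemma min?_id_eq_of_mem_iff (xs ys : List Int) (h : ∀ c : Int, c ∈ xs ↔ c ∈ ys)
    (a b : Int) (ha : PySem.List.min? xs (fun x => x) = some a)
    (hb : PySem.List.min? ys (fun x => x) = some b) : a = b := by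
  have h1 := PySem.List.min?_isMin ha b ((h b).mpr (PySem.List.min?_mem hb))
  have h2 := PySem.List.min?_isMin hb a ((h a).mp (PySem.List.min?_mem ha))
  omega

lemma max?_id_eq_of_mem_iff (xs ys : List Int) (h : ∀ c : Int, c ∈ xs ↔ c ∈ ys)
    (a b : Int) (ha : PySem.List.max? xs (fun x => x) = some a)
    (hb : PySem.List.max? ys (fun x => x) = some b) : a = b := by
  have h1 := PySem.List.max?_isMax ha b ((h b).mpr (PySem.List.max?_mem hb))
  have h2 := PySem.List.max?_isMax hb a ((h a).mp (PySem.List.max?_mem ha))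
  omega

-- ===== VERDICT (by name: the statement is the Claim_ definition above) =====
theorem majority_minority_classes_spec : Claim_equal_majority_minority_classes := by
  intro counts _
  unfold Spec_majority_minority_classes majority_minority_classes majority_minority_classes_alt
  by_cases hnil : counts = []
  · simp [hnil]
  · simp only [if_neg hnil]
    have hmem : ∀ c : Int, c ∈ counts.map Prod.snd ↔
        c ∈ (counts.foldl (fun d kv => d.modify kv.2 [] (fun g => g ++ [kv.1])) PySem.Dict.empty).keys := by
      intro c; rw [mem_groups_keys]
    have hvne : counts.map Prod.snd ≠ [] := by simp [hnil]
    have hkne : (counts.foldl (fun d kv => d.modify kv.2 [] (fun g => g ++ [kv.1])) PySem.Dict.empty).keys ≠ [] := by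
      rcases List.exists_mem_of_ne_nil _ hvne with ⟨c, hc⟩
      exact List.ne_nil_of_mem ((hmem c).mp hc)
    rcases Option.ne_none_iff_exists'.mp
        (fun h => hvne ((PySem.List.min?_eq_none_iff (counts.map Prod.snd) (fun x : Int => x)).mp h)) with ⟨a, ha⟩
    rcases Option.ne_none_iff_exists'.mp
        (fun h => hvne ((PySem.List.max?_eq_none_iff (counts.map Prod.snd) (fun x : Int => x)).mp h)) with ⟨a', ha'⟩
    rcases Option.ne_none_iff_exists'.mp
        (fun h => hkne ((PySem.List.min?_eq_none_iff _ (fun x : Int => x)).mp h)) with ⟨b, hb⟩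
    rcases Option.ne_none_iff_exists'.mp
        (fun h => hkne ((PySem.List.max?_eq_none_iff _ (fun x : Int => x)).mp h)) with ⟨b', hb'⟩
    have hab : a = b := min?_id_eq_of_mem_iff _ _ hmem a b ha hb
    have hab' : a' = b' := max?_id_eq_of_mem_iff _ _ hmem a' b' ha' hb'
    simp only [ha, ha', hb, hb', getD_groups, hab, hab']
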